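-- pv_equiv track=rewrite | github.com/DongJunHan/algorithm | 백준/Silver/1541. 잃어버린 괄호/잃어버린 괄호.py | solution
-- ===== SOURCE A (Python) =====
-- def solution(N):
--     answer = 0
--     arr = N.split("-")
--     sub = []
--     for i in range(len(arr)):
--         if "+" not in arr[i]:
--             sub.append(int(arr[i]))
--         else:
--             sub.append(sum(list(map(int, arr[i].split("+")))))
--     if len(sub) == 1:
--         return sub[0]
--     answer = sub[0]
--     for i in range(1, len(sub)):
--         answer -= sub[i]
--     return answer
-- ===== SOURCE B (Python) =====
-- def solution(N):
--     total = 0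
--     sign = 1
--     token = ""
--     for ch in N:
--         if ch in "+-":
--             total += sign * int(token)
--             if ch == "-":
--                 sign = -1
--             token = ""
--         else:
--             token += ch
--     total += sign * int(token)
--     return total
-- ===== Notes on version B (the rewrite author's own statement) =====
-- stated objective: alternative
-- what changed: Replaces A's nested split('-')/split('+') passes that build an intermediate list of group sums (then a second indexed subtraction loop) with a single left-to-right character scan keeping an accumulator and a sign flag that flips permanently at the first '-'.
-- outside the precondition, e.g. on solution('+'): A raises ValueError, B raises ValueError; on solution('-'): A raises ValueError, B raises ValueError
import Mathlib
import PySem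

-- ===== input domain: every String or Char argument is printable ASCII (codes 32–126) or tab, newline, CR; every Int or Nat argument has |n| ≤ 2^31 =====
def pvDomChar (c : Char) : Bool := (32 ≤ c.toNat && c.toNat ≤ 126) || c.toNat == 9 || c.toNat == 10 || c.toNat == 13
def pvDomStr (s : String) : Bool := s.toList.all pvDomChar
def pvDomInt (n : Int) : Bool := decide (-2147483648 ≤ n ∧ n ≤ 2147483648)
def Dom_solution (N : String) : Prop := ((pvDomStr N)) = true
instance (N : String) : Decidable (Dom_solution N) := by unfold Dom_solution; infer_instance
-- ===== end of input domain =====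

-- B is a single left-to-right character scan with a sign flag instead of A's nested split("-")/split("+")
-- group-sum lists; same return value on every input where A returns (Pre_ excludes the int() ValueErrors).

-- ===== PORT A =====
-- literal port of A: split on "-", per group either int(g) or sum of ints of g.split("+"),
-- then subtract the later group sums from the first (all indices in range, so pyGetD is exact here).
-- A's locals: arr = N.split("-"); sub = the per-group values appended in A's first loop
def subA (N : String) : List Int :=
  ((PySem.Str.split? N "-").getD []).map (fun g =>
    if PySem.Str.isIn "+" g = false then (PySem.Int.ofStr? g).getD 0
    else (((PySem.Str.split? g "+").getD []).map (fun t => (PySem.Int.ofStr? t).getD 0)).sum)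

def solution (N : String) : Int :=
  if (subA N).length = 1 then PySem.List.pyGetD (subA N) 0 0
  else (PySem.List.pyRange 1 (PySem.List.len (subA N))).foldl
        (fun answer i => answer - PySem.List.pyGetD (subA N) i 0) (PySem.List.pyGetD (subA N) 0 0)

-- ===== PORT B =====
-- one loop step of Source B: state = (total, sign, current token)
def bstep (s : Int × Int × List Char) (ch : Char) : Int × Int × List Char :=
  if ch = '+' ∨ ch = '-' then
    (s.1 + s.2.1 * (PySem.Int.ofChars? s.2.2).getD 0, (if ch = '-' then -1 else s.2.1), ([] : List Char))
  else (s.1, s.2.1, s.2.2 ++ [ch])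

-- the trailing 'total += sign * int(token)' of Source B
def bfin (s : Int × Int × List Char) : Int :=
  s.1 + s.2.1 * (PySem.Int.ofChars? s.2.2).getD 0

def solution_alt (N : String) : Int :=
  bfin (N.toList.foldl bstep (0, 1, ([] : List Char)))

-- ===== PRECONDITION & SPEC =====
-- Pre_: exactly the inputs where every '+'/'-'-delimited token parses as a Python int — elsewhere A raises ValueError.
def Pre_solution (N : String) : Prop :=
  ∀ g ∈ (PySem.Str.split? N "-").getD [], ∀ t ∈ (PySem.Str.split? g "+").getD [],
    (PySem.Int.ofStr? t).isSome = true
instance (N : String) : Decidable (Pre_solution N) := by unfold Pre_solution; infer_instance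
def pvWitness_solution : String := "55-50+40"
def Spec_solution (N : String) (out : Int) : Prop := out = solution_alt N
instance (N : String) (out : Int) : Decidable (Spec_solution N out) := by unfold Spec_solution; infer_instance

-- ===== CLAIM (what is proved, stated in full; the proofs are below) =====
def Claim_equal_solution : Prop := ∀ (N : String), Dom_solution N → Pre_solution N → Spec_solution N (solution N)

-- ===== LEMMAS AND PROOFS =====

-- reference splitter: split `pre ++ l` on the single character c (pre = piece accumulated so far)
def msp (c : Char) : List Char → List Char → List (List Char)
  | pre, [] => [pre]
  | pre, d :: rest => if d = c then pre :: msp c [] rest else msp c (pre ++ [d]) rest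

def ival (t : List Char) : Int := (PySem.Int.ofChars? t).getD 0
def gsum (g : List Char) : Int := ((msp '+' [] g).map ival).sum
def mval (cs : List Char) : Int := ((msp '-' [] cs).map gsum).sum
def pval (cs : List Char) : Int :=
  match msp '-' [] cs with
  | [] => 0
  | h :: t => gsum h - (t.map gsum).sum

lemma go_eq (c : Char) : ∀ (fuel : Nat) (l cur : List Char) (acc : List (List Char)),
    l.length < fuel →
    PySem.Chars.splitOn.go [c] fuel l cur acc = acc.reverse ++ msp c cur.reverse l := by
  intro fuel
  induction fuel with
  | zero => intro l cur acc h; omega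
  | succ n ih =>
    intro l cur acc h
    cases l with
    | nil => simp [PySem.Chars.splitOn.go, msp]
    | cons d rest =>
      by_cases hd : d = c
      · subst hd
        have : List.isPrefixOf [d] (d :: rest) = true := by simp [List.isPrefixOf]
        simp only [PySem.Chars.splitOn.go, this, if_pos]
        rw [ih _ _ _ (by simpa using Nat.lt_of_succ_lt_succ h)]
        simp [msp]
      · have : List.isPrefixOf [c] (d :: rest) = false := by
          simp [List.isPrefixOf]; exact fun h' => absurd h'.symm hd
        simp only [PySem.Chars.splitOn.go, this]
        rw [if_neg (by simp), ih _ _ _ (by simpa using Nat.lt_of_succ_lt_succ h)]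
        simp [msp, hd]

lemma splitOn_eq_msp (c : Char) (l : List Char) :
    PySem.Chars.splitOn l [c] = msp c [] l := by
  unfold PySem.Chars.splitOn
  rw [go_eq c (l.length + 1) l [] [] (by omega)]
  simp

-- Str.split? with a one-character separator, as msp
lemma split?_eq_msp (c : Char) (s sep : String) (h : sep.toList = [c]) :
    (PySem.Str.split? s sep).getD [] = (msp c [] s.toList).map String.ofList := by
  unfold PySem.Str.split? PySem.Chars.split?
  rw [h]
  simp [splitOn_eq_msp]

lemma msp_ne_nil (c : Char) : ∀ (l pre : List Char), msp c pre l ≠ [] := by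
  intro l
  induction l with
  | nil => intro pre; simp [msp]
  | cons d rest ih =>
    intro pre
    by_cases hd : d = c
    · simp [msp, hd]
    · simpa [msp, hd] using ih (pre ++ [d])

lemma msp_append (c : Char) : ∀ (p : List Char), c ∉ p →
    ∀ (pre cs : List Char), msp c pre (p ++ cs) = msp c (pre ++ p) cs := by
  intro p
  induction p with
  | nil => intro _ pre cs; simp
  | cons d p' ih =>
    intro hp pre cs
    have hd : d ≠ c := fun h => hp (h ▸ List.mem_cons_self)
    have hp' : c ∉ p' := fun h => hp (List.mem_cons_of_mem d h)
    simp only [List.cons_append, msp, if_neg hd]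
    rw [ih hp' (pre ++ [d]) cs]
    simp

lemma msp_pre (c : Char) : ∀ (cs pre : List Char),
    msp c pre cs = (pre ++ (msp c [] cs).headD []) :: (msp c [] cs).tail := by
  intro cs
  induction cs with
  | nil => intro pre; simp [msp]
  | cons d rest ih =>
    intro pre
    by_cases hd : d = c
    · simp [msp, hd]
    · rw [show msp c pre (d :: rest) = msp c (pre ++ [d]) rest from by simp [msp, hd],
          show msp c [] (d :: rest) = msp c [d] rest from by simp [msp, hd],
          ih (pre ++ [d]), ih [d]]
      simp

lemma msp_not_mem (c : Char) (g : List Char) (hg : c ∉ g) : msp c [] g = [g] := by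
  have := msp_append c g hg [] []
  simpa [msp] using this

lemma gsum_no_plus (tok : List Char) (h : '+' ∉ tok) : gsum tok = ival tok := by
  simp [gsum, msp_not_mem _ _ h]

lemma gsum_plus (tok g : List Char) (h : '+' ∉ tok) :
    gsum (tok ++ '+' :: g) = ival tok + gsum g := by
  unfold gsum
  rw [show tok ++ '+' :: g = tok ++ ('+' :: g) from rfl, msp_append '+' tok h [] ('+' :: g)]
  simp [msp]

lemma mval_token (tok : List Char) (h₁ : '+' ∉ tok) (h₂ : '-' ∉ tok) : mval tok = ival tok := by
  simp [mval, msp_not_mem _ _ h₂, gsum_no_plus _ h₁]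

lemma msp_minus_head (tok cs : List Char) (h₂ : '-' ∉ tok) :
    msp '-' [] (tok ++ '-' :: cs) = tok :: msp '-' [] cs := by
  rw [msp_append '-' tok h₂ [] ('-' :: cs)]
  simp [msp]

lemma msp_plus_head (tok cs : List Char) (h₂ : '-' ∉ tok) :
    msp '-' [] (tok ++ '+' :: cs)
      = (tok ++ '+' :: (msp '-' [] cs).headD []) :: (msp '-' [] cs).tail := by
  have hnp : ('-' : Char) ∉ tok ++ ['+'] := by
    intro h; rcases List.mem_append.mp h with h | h
    · exact h₂ h
    · simp at h
  rw [show tok ++ '+' :: cs = (tok ++ ['+']) ++ cs from by simp,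
      msp_append '-' (tok ++ ['+']) hnp [] cs, msp_pre]
  simp

lemma mval_plus (tok cs : List Char) (h₁ : '+' ∉ tok) (h₂ : '-' ∉ tok) :
    mval (tok ++ '+' :: cs) = ival tok + mval cs := by
  unfold mval
  rw [msp_plus_head tok cs h₂]
  obtain ⟨hd, tl, he⟩ := List.exists_cons_of_ne_nil (msp_ne_nil '-' cs [])
  rw [he]
  simp [gsum_plus _ _ h₁]
  ring

lemma mval_minus (tok cs : List Char) (h₁ : '+' ∉ tok) (h₂ : '-' ∉ tok) :
    mval (tok ++ '-' :: cs) = ival tok + mval cs := by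
  unfold mval
  rw [msp_minus_head tok cs h₂]
  simp [gsum_no_plus _ h₁]

lemma pval_token (tok : List Char) (h₁ : '+' ∉ tok) (h₂ : '-' ∉ tok) : pval tok = ival tok := by
  simp [pval, msp_not_mem _ _ h₂, gsum_no_plus _ h₁]

lemma pval_plus (tok cs : List Char) (h₁ : '+' ∉ tok) (h₂ : '-' ∉ tok) :
    pval (tok ++ '+' :: cs) = ival tok + pval cs := by
  unfold pval
  rw [msp_plus_head tok cs h₂]
  obtain ⟨hd, tl, he⟩ := List.exists_cons_of_ne_nil (msp_ne_nil '-' cs [])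
  rw [he]
  simp [gsum_plus _ _ h₁]
  ring

lemma pval_minus (tok cs : List Char) (h₁ : '+' ∉ tok) (h₂ : '-' ∉ tok) :
    pval (tok ++ '-' :: cs) = ival tok - mval cs := by
  unfold pval mval
  rw [msp_minus_head tok cs h₂]
  simp [gsum_no_plus _ h₁]

lemma not_mem_append_of (a c : Char) (tok : List Char) (h : a ∉ tok) (hc : c ≠ a) :
    a ∉ tok ++ [c] := by
  intro hm
  rcases List.mem_append.mp hm with hm | hm
  · exact h hm
  · simp at hm; exact hc hm.symm

lemma bneg : ∀ (cs tok : List Char) (total : Int), '+' ∉ tok → '-' ∉ tok →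
    bfin (cs.foldl bstep (total, -1, tok)) = total - mval (tok ++ cs) := by
  intro cs
  induction cs with
  | nil =>
    intro tok total h₁ h₂
    simp only [List.foldl_nil, List.append_nil, bfin]
    rw [mval_token tok h₁ h₂]
    unfold ival
    ring
  | cons c cs' ih =>
    intro tok total h₁ h₂
    by_cases hsep : c = '+' ∨ c = '-'
    · have hstep : bstep (total, -1, tok) c
          = (total + (-1) * ival tok, -1, ([] : List Char)) := by
        rcases hsep with h | h <;> simp [bstep, h, ival]
      rw [List.foldl_cons, hstep, ih [] _ (by simp) (by simp)]
      rcases hsep with h | h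
      · subst h; rw [mval_plus tok cs' h₁ h₂]; simp; ring
      · subst h; rw [mval_minus tok cs' h₁ h₂]; simp; ring
    · have hplus : ¬ c = '+' := fun h => hsep (Or.inl h)
      have hminus : ¬ c = '-' := fun h => hsep (Or.inr h)
      have hstep : bstep (total, -1, tok) c = (total, -1, tok ++ [c]) := by
        simp [bstep, hplus, hminus]
      rw [List.foldl_cons, hstep,
          ih (tok ++ [c]) _ (not_mem_append_of _ _ _ h₁ hplus)
            (not_mem_append_of _ _ _ h₂ hminus)]
      simp

lemma bpos : ∀ (cs tok : List Char) (total : Int), '+' ∉ tok → '-' ∉ tok →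
    bfin (cs.foldl bstep (total, 1, tok)) = total + pval (tok ++ cs) := by
  intro cs
  induction cs with
  | nil =>
    intro tok total h₁ h₂
    simp only [List.foldl_nil, List.append_nil, bfin]
    rw [pval_token tok h₁ h₂]
    unfold ival
    ring
  | cons c cs' ih =>
    intro tok total h₁ h₂
    rcases em (c = '+') with h | hplus
    · subst h
      have hstep : bstep (total, 1, tok) '+'
          = (total + 1 * ival tok, 1, ([] : List Char)) := by
        simp [bstep, ival]
      rw [List.foldl_cons, hstep, ih [] _ (by simp) (by simp),
          pval_plus tok cs' h₁ h₂]
      simp; ring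
    · rcases em (c = '-') with h | hminus
      · subst h
        have hstep : bstep (total, 1, tok) '-'
            = (total + 1 * ival tok, -1, ([] : List Char)) := by
          simp [bstep, ival]
        rw [List.foldl_cons, hstep, bneg cs' [] _ (by simp) (by simp),
            pval_minus tok cs' h₁ h₂]
        simp; ring
      · have hstep : bstep (total, 1, tok) c = (total, 1, tok ++ [c]) := by
          simp [bstep, hplus, hminus]
        rw [List.foldl_cons, hstep,
            ih (tok ++ [c]) _ (not_mem_append_of _ _ _ h₁ hplus)
              (not_mem_append_of _ _ _ h₂ hminus)]
        simp

lemma foldl_sub_eq (l : List Int) : ∀ (i : Int), l.foldl (· - ·) i = i - l.sum := by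
  induction l with
  | nil => intro i; simp
  | cons x l ih => intro i; rw [List.foldl_cons, ih]; simp; ring

lemma singleton_infix_iff (a : Char) (l : List Char) : [a] <:+: l ↔ a ∈ l := by
  constructor
  · intro h; exact h.subset (List.mem_singleton_self a)
  · intro h
    obtain ⟨s, t, rfl⟩ := List.append_of_mem h
    exact ⟨s, t, by simp⟩

lemma subA_eq (N : String) : subA N = (msp '-' [] N.toList).map gsum := by
  unfold subA
  rw [split?_eq_msp '-' N "-" (by decide), List.map_map]
  apply List.map_congr_left
  intro g _
  simp only [Function.comp_apply]
  by_cases hp : '+' ∈ g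
  · have h1 : PySem.Str.isIn "+" (String.ofList g) = true := by
      rw [PySem.Str.isIn_iff_infix]
      simpa [singleton_infix_iff] using hp
    rw [if_neg (by rw [h1]; simp)]
    rw [split?_eq_msp '+' (String.ofList g) "+" (by decide),
        show (String.ofList g).toList = g from by simp]
    unfold gsum
    rw [List.map_map]
    congr 1
    apply List.map_congr_left
    intro t _
    simp [ival, PySem.Int.ofStr?]
  · have h1 : PySem.Str.isIn "+" (String.ofList g) = false := by
      rw [← Bool.not_eq_true, PySem.Str.isIn_iff_infix]
      simpa [singleton_infix_iff] using hp
    rw [if_pos h1, gsum_no_plus g hp]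
    simp [ival, PySem.Int.ofStr?]

lemma A_eq_pval (N : String) : solution N = pval N.toList := by
  unfold solution
  rw [subA_eq]
  obtain ⟨hd, tl, he⟩ := List.exists_cons_of_ne_nil (msp_ne_nil '-' N.toList [])
  rw [he]
  by_cases htl : tl = []
  · subst htl
    simp [pval, he, PySem.List.pyGetD]
  · have hlen : (List.map gsum (hd :: tl)).length ≠ 1 := by
      intro h
      exact htl (by simpa using h)
    rw [if_neg hlen]
    rw [PySem.List.foldl_pyRange_pyGetD (List.map gsum (hd :: tl)) 0 (· - ·) _ (by norm_num)]
    rw [foldl_sub_eq]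
    simp [pval, he, PySem.List.pyGetD]

lemma B_eq_pval (N : String) : solution_alt N = pval N.toList := by
  unfold solution_alt
  rw [bpos N.toList [] 0 (by simp) (by simp)]
  simp

-- ===== VERDICT (by name: the statement is the Claim_ definition above) =====
theorem solution_spec : Claim_equal_solution := by
  intro N _ _
  unfold Spec_solution
  rw [A_eq_pval, B_eq_pval]
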